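-- pv_equiv track=rewrite | github.com/robertcprice/nCPU | workloads/neural_os/neural_pattern_optimizer.py | _classify_loop
-- ===== SOURCE A (Python) =====
-- def _classify_loop(instructions):
--     """Classify what kind of loop this is."""
--
--     # Count operations in recent instructions
--     loads = sum(1 for inst in instructions if inst and len(inst) >= 7 and inst[4])  # is_load
--     stores = sum(1 for inst in instructions if inst and len(inst) >= 7 and inst[5])  # is_store
--     adds = sum(1 for inst in instructions if inst and len(inst) >= 7 and inst[3] == 0)  # ADD
--     subs = sum(1 for inst in instructions if inst and len(inst) >= 7 and inst[3] == 1)  # SUB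
--     cmps = sum(1 for inst in instructions if inst and len(inst) >= 7 and inst[3] == 11)  # COMPARE
--
--     if stores > 0 and adds > 0 and cmps > 0:
--         return "MEMSET-loop"
--     elif loads > 0 and stores > 0 and subs > 0:
--         return "MEMCPY-loop"
--     elif loads > 0 and cmps > 0 and adds == 0 and subs == 0:
--         return "POLLING-loop"
--     elif (adds > 0 or subs > 0) and cmps > 0:
--         return "ARITHMETIC-loop"
--     else:
--         return "LOOP"
-- ===== SOURCE B (Python) =====
-- def _classify_loop(instructions):
--     """Classify what kind of loop this is."""
--     # One pass with five explicit counters instead of five separate comprehensions.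
--     loads = stores = adds = subs = cmps = 0
--     for inst in instructions:
--         if not (inst and len(inst) >= 7):
--             continue
--         if inst[4]:
--             loads += 1
--         if inst[5]:
--             stores += 1
--         if inst[3] == 0:
--             adds += 1
--         if inst[3] == 1:
--             subs += 1
--         if inst[3] == 11:
--             cmps += 1
--     if stores > 0 and adds > 0 and cmps > 0:
--         return "MEMSET-loop"
--     elif loads > 0 and stores > 0 and subs > 0:
--         return "MEMCPY-loop"
--     elif loads > 0 and cmps > 0 and adds == 0 and subs == 0:
--         return "POLLING-loop"
--     elif (adds > 0 or subs > 0) and cmps > 0: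
--         return "ARITHMETIC-loop"
--     else:
--         return "LOOP"
-- ===== Notes on version B (the rewrite author's own statement) =====
-- stated objective: simpler
-- what changed: Five separate generator-sum passes over the instruction list are replaced by one explicit loop maintaining five counters; the classification chain is unchanged.
import Mathlib
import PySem

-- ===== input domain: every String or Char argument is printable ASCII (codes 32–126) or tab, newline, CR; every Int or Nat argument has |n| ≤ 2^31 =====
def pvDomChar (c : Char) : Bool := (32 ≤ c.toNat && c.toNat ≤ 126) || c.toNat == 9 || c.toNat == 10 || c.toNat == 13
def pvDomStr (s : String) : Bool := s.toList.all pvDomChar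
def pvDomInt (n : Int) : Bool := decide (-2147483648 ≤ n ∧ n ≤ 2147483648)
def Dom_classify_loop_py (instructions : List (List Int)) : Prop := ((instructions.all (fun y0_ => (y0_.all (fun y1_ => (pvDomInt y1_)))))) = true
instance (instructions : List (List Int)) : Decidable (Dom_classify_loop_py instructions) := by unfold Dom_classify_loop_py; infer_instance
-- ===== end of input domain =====

-- B replaces A's five separate counting passes over `instructions` by one explicit loop
-- maintaining five counters (objective: simpler, one pass instead of five).


-- ===== PORT A =====
-- guard `inst and len(inst) >= 7`: nonempty list and length ≥ 7.
-- inst[3]/inst[4]/inst[5] are only reached with length ≥ 7, so pyGetD's default is never used (exact).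
def pvGuard (inst : List Int) : Bool := !inst.isEmpty && decide (7 ≤ inst.length)

def pvIsLoad (inst : List Int) : Bool := pvGuard inst && (PySem.List.pyGetD inst 4 0 != 0)
def pvIsStore (inst : List Int) : Bool := pvGuard inst && (PySem.List.pyGetD inst 5 0 != 0)
def pvIsAdd (inst : List Int) : Bool := pvGuard inst && (PySem.List.pyGetD inst 3 0 == 0)
def pvIsSub (inst : List Int) : Bool := pvGuard inst && (PySem.List.pyGetD inst 3 0 == 1)
def pvIsCmp (inst : List Int) : Bool := pvGuard inst && (PySem.List.pyGetD inst 3 0 == 11)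

-- sum(1 for inst in instructions if p inst)
def pvSumIf (p : List Int → Bool) (xs : List (List Int)) : Int :=
  xs.foldl (fun acc inst => if p inst then acc + 1 else acc) 0

def classify_loop_py (instructions : List (List Int)) : String :=
  let loads := pvSumIf pvIsLoad instructions
  let stores := pvSumIf pvIsStore instructions
  let adds := pvSumIf pvIsAdd instructions
  let subs := pvSumIf pvIsSub instructions
  let cmps := pvSumIf pvIsCmp instructions
  if stores > 0 ∧ adds > 0 ∧ cmps > 0 then "MEMSET-loop"
  else if loads > 0 ∧ stores > 0 ∧ subs > 0 then "MEMCPY-loop"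
  else if loads > 0 ∧ cmps > 0 ∧ adds = 0 ∧ subs = 0 then "POLLING-loop"
  else if (adds > 0 ∨ subs > 0) ∧ cmps > 0 then "ARITHMETIC-loop"
  else "LOOP"

-- ===== PORT B =====
-- one pass: a fold carrying the five counters (loads, stores, adds, subs, cmps)
-- B's own guard for `inst and len(inst) >= 7`
def pvGuardB (inst : List Int) : Bool := !inst.isEmpty && decide (7 ≤ inst.length)

def pvStep (s : Int × Int × Int × Int × Int) (inst : List Int) : Int × Int × Int × Int × Int :=
  if !(pvGuardB inst) then s
  else
    let (loads, stores, adds, subs, cmps) := s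
    let loads := if PySem.List.pyGetD inst 4 0 != 0 then loads + 1 else loads
    let stores := if PySem.List.pyGetD inst 5 0 != 0 then stores + 1 else stores
    let adds := if PySem.List.pyGetD inst 3 0 == 0 then adds + 1 else adds
    let subs := if PySem.List.pyGetD inst 3 0 == 1 then subs + 1 else subs
    let cmps := if PySem.List.pyGetD inst 3 0 == 11 then cmps + 1 else cmps
    (loads, stores, adds, subs, cmps)

def classify_loop_py_alt (instructions : List (List Int)) : String :=
  let (loads, stores, adds, subs, cmps) := instructions.foldl pvStep (0, 0, 0, 0, 0)
  if stores > 0 ∧ adds > 0 ∧ cmps > 0 then "MEMSET-loop"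
  else if loads > 0 ∧ stores > 0 ∧ subs > 0 then "MEMCPY-loop"
  else if loads > 0 ∧ cmps > 0 ∧ adds = 0 ∧ subs = 0 then "POLLING-loop"
  else if (adds > 0 ∨ subs > 0) ∧ cmps > 0 then "ARITHMETIC-loop"
  else "LOOP"

-- ===== PRECONDITION & SPEC =====
def Spec_classify_loop_py (instructions : List (List Int)) (out : String) : Prop := out = classify_loop_py_alt instructions
instance (instructions : List (List Int)) (out : String) : Decidable (Spec_classify_loop_py instructions out) := by unfold Spec_classify_loop_py; infer_instance

-- ===== CLAIM (what is proved, stated in full; the proofs are below) =====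
def Claim_equal_classify_loop_py : Prop := ∀ (instructions : List (List Int)), Dom_classify_loop_py instructions → Spec_classify_loop_py instructions (classify_loop_py instructions)

-- ===== LEMMAS AND PROOFS =====
lemma pvSumIf_from (p : List Int → Bool) (xs : List (List Int)) (a : Int) :
    xs.foldl (fun acc inst => if p inst then acc + 1 else acc) a = a + pvSumIf p xs := by
  induction xs generalizing a with
  | nil => simp [pvSumIf]
  | cons x xs ih =>
      simp only [pvSumIf, List.foldl_cons]
      rw [ih, ih]
      split <;> ring

lemma pvSumIf_cons (p : List Int → Bool) (x : List Int) (xs : List (List Int)) :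
    pvSumIf p (x :: xs) = (if p x then 1 else 0) + pvSumIf p xs := by
  simp only [pvSumIf, List.foldl_cons]
  rw [pvSumIf_from]
  rw [show List.foldl (fun acc inst => if p inst = true then acc + 1 else acc) 0 xs
        = pvSumIf p xs from rfl]
  split <;> ring

lemma pvFoldl_eq (xs : List (List Int)) :
    xs.foldl pvStep (0, 0, 0, 0, 0) =
      (pvSumIf pvIsLoad xs, pvSumIf pvIsStore xs, pvSumIf pvIsAdd xs,
       pvSumIf pvIsSub xs, pvSumIf pvIsCmp xs) := by
  suffices h : ∀ (a b c d e : Int), xs.foldl pvStep (a, b, c, d, e) =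
      (a + pvSumIf pvIsLoad xs, b + pvSumIf pvIsStore xs, c + pvSumIf pvIsAdd xs,
       d + pvSumIf pvIsSub xs, e + pvSumIf pvIsCmp xs) by
    simpa using h 0 0 0 0 0
  induction xs with
  | nil => intro a b c d e; simp [pvSumIf]
  | cons x xs ih =>
      intro a b c d e
      simp only [List.foldl_cons, pvSumIf_cons]
      have hgb : pvGuardB x = pvGuard x := rfl
      by_cases hg : pvGuard x
      · simp only [pvStep, hgb, hg, Bool.not_true, Bool.false_eq_true, if_false]
        rw [ih]
        simp only [pvIsLoad, pvIsStore, pvIsAdd, pvIsSub, pvIsCmp, hg, Bool.true_and,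
          Prod.mk.injEq]
        split_ifs <;> refine ⟨by ring, by ring, by ring, by ring, by ring⟩
      · simp only [Bool.not_eq_true] at hg
        simp [pvStep, hgb, hg, ih, pvIsLoad, pvIsStore, pvIsAdd, pvIsSub, pvIsCmp]

-- ===== VERDICT (by name: the statement is the Claim_ definition above) =====
theorem classify_loop_py_spec : Claim_equal_classify_loop_py := by
  intro instructions _
  unfold Spec_classify_loop_py classify_loop_py classify_loop_py_alt
  rw [pvFoldl_eq]
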